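-- pv_equiv track=rewrite | github.com/tsingletaryTT/tt-top | tt_smi/tt_top_widget.py | _combine_panels_horizontally
-- ===== SOURCE A (Python) =====
-- from typing import Dict, List
--
-- def _combine_panels_horizontally(left_panel: List[str], right_panel: List[str]) -> List[str]:
--     """Combine two panels horizontally"""
--     combined = []
--     max_lines = max(len(left_panel), len(right_panel))
--
--     for i in range(max_lines):
--         left_line = left_panel[i] if i < len(left_panel) else " " * 42
--         right_line = right_panel[i] if i < len(right_panel) else " " * 42
--         combined.append(f"{left_line}  {right_line}")
--
--     return combined
-- ===== SOURCE B (Python) =====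
-- from typing import List
--
--
-- def _combine_panels_horizontally(left_panel: List[str], right_panel: List[str]) -> List[str]:
--     """Combine two panels horizontally"""
--     fill = " " * 42
--     n = min(len(left_panel), len(right_panel))
--     head = [f"{l}  {r}" for l, r in zip(left_panel, right_panel)]
--     tail = ([f"{l}  {fill}" for l in left_panel[n:]]
--             + [f"{fill}  {r}" for r in right_panel[n:]])
--     return head + tail
-- ===== Notes on version B (the rewrite author's own statement) =====
-- stated objective: alternative
-- what changed: Replaces the single index loop over range(max_lines) with per-line bounds guards by a staged decomposition: a zip pass over the common prefix plus a separate padded pass over whichever panel's leftover slice is nonempty, concatenated.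
import Mathlib
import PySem

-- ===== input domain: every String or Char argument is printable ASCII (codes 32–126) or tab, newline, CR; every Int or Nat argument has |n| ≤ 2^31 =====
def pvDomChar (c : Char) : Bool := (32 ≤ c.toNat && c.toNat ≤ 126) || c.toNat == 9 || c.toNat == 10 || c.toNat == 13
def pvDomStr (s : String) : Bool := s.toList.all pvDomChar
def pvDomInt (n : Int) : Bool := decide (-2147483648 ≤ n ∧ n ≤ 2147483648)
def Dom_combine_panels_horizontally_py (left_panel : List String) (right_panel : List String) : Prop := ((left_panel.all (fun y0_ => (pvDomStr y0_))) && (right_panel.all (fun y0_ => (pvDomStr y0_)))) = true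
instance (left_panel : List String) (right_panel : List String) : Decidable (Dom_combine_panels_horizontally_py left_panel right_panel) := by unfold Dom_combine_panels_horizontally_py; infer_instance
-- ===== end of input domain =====

-- B builds the result in stages — a zip pass over the common prefix plus one padded pass over the leftover slice — instead of A's single index loop with per-line bounds guards (alternative decomposition; same cost).

-- ===== PORT A =====
-- " " * 42
def pvFill42 : String := "                                          "

def combine_panels_horizontally_py (left_panel : List String) (right_panel : List String) : List String :=
  let max_lines : Int := max (left_panel.length : Int) (right_panel.length : Int)
  (PySem.List.pyRange 0 max_lines 1).foldl (fun combined i =>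
    let left_line := if i < (left_panel.length : Int) then PySem.List.pyGetD left_panel i "" else pvFill42
    let right_line := if i < (right_panel.length : Int) then PySem.List.pyGetD right_panel i "" else pvFill42
    combined ++ [left_line ++ "  " ++ right_line]) []

-- ===== PORT B =====
def combine_panels_horizontally_py_alt (left_panel : List String) (right_panel : List String) : List String :=
  let n : Nat := min left_panel.length right_panel.length
  let head := List.zipWith (fun l r => l ++ "  " ++ r) left_panel right_panel
  let tail := (PySem.List.slice left_panel (some (n : Int)) none).map (fun l => l ++ "  " ++ pvFill42)
      ++ (PySem.List.slice right_panel (some (n : Int)) none).map (fun r => pvFill42 ++ "  " ++ r)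
  head ++ tail

-- ===== PRECONDITION & SPEC =====
def Spec_combine_panels_horizontally_py (left_panel : List String) (right_panel : List String) (out : List String) : Prop := out = combine_panels_horizontally_py_alt left_panel right_panel
instance (left_panel : List String) (right_panel : List String) (out : List String) : Decidable (Spec_combine_panels_horizontally_py left_panel right_panel out) := by unfold Spec_combine_panels_horizontally_py; infer_instance

-- ===== CLAIM (what is proved, stated in full; the proofs are below) =====
def Claim_equal_combine_panels_horizontally_py : Prop := ∀ (left_panel : List String) (right_panel : List String), Dom_combine_panels_horizontally_py left_panel right_panel → Spec_combine_panels_horizontally_py left_panel right_panel (combine_panels_horizontally_py left_panel right_panel)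

-- ===== LEMMAS AND PROOFS =====

-- one line of panel `l` (or the 42-space filler when i is past the end)
def pvSide (l : List String) (i : Int) : String :=
  if i < (l.length : Int) then PySem.List.pyGetD l i "" else pvFill42

theorem pvSide_nil (k : Nat) : pvSide [] (k : Int) = pvFill42 := by
  rw [pvSide, if_neg (by simp only [List.length_nil]; omega)]

theorem pvSide_lt (l : List String) (k : Nat) (h : k < l.length) :
    pvSide l (k : Int) = l.getD k "" := by
  rw [pvSide, if_pos (by exact_mod_cast h), PySem.List.pyGetD_natCast]

theorem pvSide_zero' (x : String) (l : List String) : pvSide (x :: l) ((0 : Nat) : Int) = x := by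
  rw [pvSide, if_pos (by simp only [List.length_cons]; push_cast; omega),
      PySem.List.pyGetD_natCast, List.getD_cons_zero]

theorem pvSide_succ' (x : String) (l : List String) (k : Nat) :
    pvSide (x :: l) ((k + 1 : Nat) : Int) = pvSide l (k : Int) := by
  rw [pvSide, pvSide, PySem.List.pyGetD_natCast, PySem.List.pyGetD_natCast, List.getD_cons_succ]
  by_cases h : k < l.length
  · rw [if_pos (by simp only [List.length_cons]; push_cast; omega),
        if_pos (by exact_mod_cast h)]
  · rw [if_neg (by simp only [List.length_cons]; push_cast; omega),
        if_neg (by omega)]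

-- one whole panel rendered through pvSide (every index in range)
theorem pvRangeMap_side (f : String → String) (l : List String) :
    (List.range l.length).map (fun (k : Nat) => f (pvSide l (k : Int))) = l.map f := by
  apply List.ext_getElem
  · simp
  · intro i h1 h2
    simp only [List.getElem_map, List.getElem_range]
    rw [pvSide_lt l i (by simpa using h1), List.getD_eq_getElem]

theorem pvRangeMap_eq_alt (l r : List String) :
    (List.range (max l.length r.length)).map
      (fun (k : Nat) => pvSide l (k : Int) ++ "  " ++ pvSide r (k : Int))
      = combine_panels_horizontally_py_alt l r := by
  induction l generalizing r with
  | nil =>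
    simp only [combine_panels_horizontally_py_alt, List.length_nil, Nat.zero_min, List.zipWith_nil_left, Nat.cast_zero, PySem.List.slice_zero_start,
      PySem.List.slice_none_none, List.map_nil, List.nil_append, Nat.max_eq_right (Nat.zero_le _)]
    rw [← pvRangeMap_side (fun s => pvFill42 ++ "  " ++ s) r]
    apply List.map_congr_left
    intro k _
    rw [pvSide_nil]
  | cons x xs ihl =>
    cases r with
    | nil =>
      simp only [combine_panels_horizontally_py_alt, List.length_nil, Nat.min_zero, List.zipWith_nil_right, Nat.cast_zero, PySem.List.slice_zero_start,
        PySem.List.slice_none_none, List.map_nil, List.nil_append, List.append_nil,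
        Nat.max_eq_left (Nat.zero_le _)]
      rw [← pvRangeMap_side (fun s => s ++ "  " ++ pvFill42) (x :: xs)]
      apply List.map_congr_left
      intro k _
      rw [pvSide_nil]
    | cons y ys =>
      rw [show max (x :: xs).length (y :: ys).length = max xs.length ys.length + 1 by
          simp only [List.length_cons]; omega]
      rw [List.range_succ_eq_map]
      simp only [List.map_cons, List.map_map]
      rw [combine_panels_horizontally_py_alt]
      simp only [List.length_cons, PySem.List.slice_from_natCast,
        show min (xs.length + 1) (ys.length + 1) = min xs.length ys.length + 1 by omega,
        List.zipWith_cons_cons, List.drop_succ_cons]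
      rw [List.cons_append]
      congr 1
      · rw [pvSide_zero', pvSide_zero']
      · have ih := ihl ys
        simp only [combine_panels_horizontally_py_alt, PySem.List.slice_from_natCast] at ih
        rw [← ih]
        apply List.map_congr_left
        intro k _
        simp only [Function.comp_apply, Nat.succ_eq_add_one]
        rw [pvSide_succ', pvSide_succ']

-- ===== VERDICT (by name: the statement is the Claim_ definition above) =====
theorem combine_panels_horizontally_py_spec : Claim_equal_combine_panels_horizontally_py := by
  intro l r _
  unfold Spec_combine_panels_horizontally_py combine_panels_horizontally_py
  rw [PySem.List.foldl_append_singleton_eq_map, PySem.List.pyRange_one]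
  simp only [sub_zero, List.nil_append, List.map_map]
  rw [show (max (l.length : Int) (r.length : Int)).toNat = max l.length r.length by omega]
  rw [← pvRangeMap_eq_alt l r]
  apply List.map_congr_left
  intro k _
  simp only [Function.comp, zero_add, pvSide]
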